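-- pv_equiv track=rewrite | github.com/OrlyS112561/pokergameweb | main.py | check_board_fullhouse
-- ===== SOURCE A (Python) =====
-- def check_board_fullhouse(player1, player2, board):
--     is_board_fullhouse = False
--     card3ofakind = 0
--     for i in range(0,14):
--         if board.count(i) == 3:
--             card3ofakind = i
--             for i in range(0,14):
--                 if board.count(i) == 2:
--                     card2ofakind = i
--                     if player1[0] == card3ofakind or player1[1] == card3ofakind or player2[0] == card3ofakind or player2[1] == card3ofakind:
--                             is_board_fullhouse = False
--                     elif player1[0] == card2ofakind and player1[0] > card3ofakind or player1[1] == card2ofakind and player1[1] > card3ofakind or player2[0] == card2ofakind and player2[0] > card3ofakind or player2[1] == card2ofakind and player2[1] > card3ofakind: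
--                             is_board_fullhouse = False
--                     else:
--                         is_board_fullhouse = True
--                         break
--             break
--     return is_board_fullhouse
-- ===== SOURCE B (Python) =====
-- def _runs(s):
--     # maximal runs of equal values in an already-sorted list: [(value, run length), ...]
--     runs = []
--     i = 0
--     while i < len(s):
--         j = i
--         while j < len(s) and s[j] == s[i]:
--             j += 1
--         runs.append((s[i], j - i))
--         i = j
--     return runs
--
--
-- def check_board_fullhouse(player1, player2, board):
--     runs = _runs(sorted(board))
--     trips = [v for v, n in runs if n == 3 and 0 <= v <= 13]
--     pairs = [v for v, n in runs if n == 2 and 0 <= v <= 13]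
--     if not trips or not pairs:
--         return False
--     t = trips[0]
--     holes = (player1[0], player1[1], player2[0], player2[1])
--     return t not in holes and any(p not in holes or p <= t for p in pairs)
-- ===== Notes on version B (the rewrite author's own statement) =====
-- stated objective: alternative
-- what changed: Instead of scanning ranks 0..13 with repeated board.count inside nested break/flag loops, B sorts the board once, splits it into maximal runs of equal values, and reads the trip and pair ranks directly off the run lengths; the verdict is a direct boolean condition on hole cards instead of the flag-overwrite/break machinery.
-- outside the precondition, e.g. on check_board_fullhouse([3], [0, 0], [3, 3, 3, 2, 2]): A returns False, B raises IndexError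
import Mathlib
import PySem

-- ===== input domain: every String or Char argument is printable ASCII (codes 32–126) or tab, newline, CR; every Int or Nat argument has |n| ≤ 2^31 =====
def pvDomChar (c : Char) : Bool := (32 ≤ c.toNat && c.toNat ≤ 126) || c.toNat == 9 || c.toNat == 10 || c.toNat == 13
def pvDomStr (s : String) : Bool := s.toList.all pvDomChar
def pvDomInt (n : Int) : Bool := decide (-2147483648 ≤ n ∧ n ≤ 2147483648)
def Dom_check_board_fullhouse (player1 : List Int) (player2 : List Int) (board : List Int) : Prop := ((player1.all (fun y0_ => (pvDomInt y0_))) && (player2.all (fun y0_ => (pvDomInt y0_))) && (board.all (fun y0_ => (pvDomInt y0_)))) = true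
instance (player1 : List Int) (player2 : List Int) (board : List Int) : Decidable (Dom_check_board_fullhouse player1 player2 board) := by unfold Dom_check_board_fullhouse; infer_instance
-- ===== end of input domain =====

-- B sorts the board once and reads trip/pair ranks off maximal runs of equal values, replacing A's nested rank-scan break/flag loops (alternative algorithm); equivalence is about the return value.


-- ===== PORT A =====
-- hole-card access player[i]; Pre_ guarantees the index is in range whenever either Python reads it
def pvGetA (l : List Int) (i : Int) : Int := (PySem.List.pyGet? l i).getD 0

-- inner 'for i in range(0,14)' loop: is_board_fullhouse flag reassignment, break on the else branch
def pvAinner (p1 p2 board : List Int) (c3 : Int) : List Int → Bool → Bool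
  | [], acc => acc
  | p :: rest, acc =>
    if board.count p == 2 then
      if pvGetA p1 0 == c3 || pvGetA p1 1 == c3 || pvGetA p2 0 == c3 || pvGetA p2 1 == c3 then
        pvAinner p1 p2 board c3 rest false
      else if (pvGetA p1 0 == p && decide (pvGetA p1 0 > c3)) || (pvGetA p1 1 == p && decide (pvGetA p1 1 > c3)) ||
              (pvGetA p2 0 == p && decide (pvGetA p2 0 > c3)) || (pvGetA p2 1 == p && decide (pvGetA p2 1 > c3)) then
        pvAinner p1 p2 board c3 rest false
      else true  -- is_board_fullhouse = True; break
    else pvAinner p1 p2 board c3 rest acc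

-- outer 'for i in range(0,14)' loop: on the first rank with count 3 run the inner loop, then break
def pvAouter (p1 p2 board : List Int) : List Int → Bool
  | [] => false
  | i :: rest =>
    if board.count i == 3 then pvAinner p1 p2 board i (PySem.List.pyRange 0 14 1) false
    else pvAouter p1 p2 board rest

def check_board_fullhouse (player1 : List Int) (player2 : List Int) (board : List Int) : Bool :=
  pvAouter player1 player2 board (PySem.List.pyRange 0 14 1)

-- ===== PORT B =====
-- _runs(s): the outer while walks the sorted list; the inner while 'j += 1 while s[j] == s[i]'
-- measures the current run (the takeWhile prefix) and 'i = j' jumps past it (the dropWhile suffix)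
def pvRuns : List Int → List (Int × Int)
  | [] => []
  | v :: rest =>
    (v, ((rest.takeWhile (fun x => x == v)).length : Int) + 1) ::
      pvRuns (rest.dropWhile (fun x => x == v))
termination_by s => s.length
decreasing_by
  have h := List.length_dropWhile_le (fun x => x == v) rest
  simpa using Nat.lt_succ_of_le h

def check_board_fullhouse_alt (player1 : List Int) (player2 : List Int) (board : List Int) : Bool :=
  let runs := pvRuns (PySem.List.sorted board (fun x => x) false)
  let trips := (runs.filter (fun vn => vn.2 == 3 && decide (0 ≤ vn.1) && decide (vn.1 ≤ 13))).map Prod.fst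
  let pairs := (runs.filter (fun vn => vn.2 == 2 && decide (0 ≤ vn.1) && decide (vn.1 ≤ 13))).map Prod.fst
  match trips, pairs with
  | t :: _, _ :: _ =>
    let holes := [pvGetA player1 0, pvGetA player1 1, pvGetA player2 0, pvGetA player2 1]
    !holes.contains t && pairs.any (fun p => !holes.contains p || decide (p ≤ t))
  | _, _ => false

-- ===== PRECONDITION & SPEC =====
-- Pre_ excludes inputs where a hole hand has fewer than 2 cards while the board has both a trip rank
-- and a pair rank: there Python A either raises IndexError or returns a value only by accident of
-- `or` short-circuiting, and B raises IndexError.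
def Pre_check_board_fullhouse (player1 : List Int) (player2 : List Int) (board : List Int) : Prop :=
  ((∃ t ∈ PySem.List.pyRange 0 14 1, board.count t = 3) ∧ (∃ p ∈ PySem.List.pyRange 0 14 1, board.count p = 2)) →
    (2 ≤ player1.length ∧ 2 ≤ player2.length)
instance (player1 : List Int) (player2 : List Int) (board : List Int) : Decidable (Pre_check_board_fullhouse player1 player2 board) := by unfold Pre_check_board_fullhouse; infer_instance

def pvWitness_check_board_fullhouse : List Int × List Int × List Int := ([1, 2], [6, 7], [4, 4, 4, 5, 5])

def Spec_check_board_fullhouse (player1 : List Int) (player2 : List Int) (board : List Int) (out : Bool) : Prop := out = check_board_fullhouse_alt player1 player2 board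
instance (player1 : List Int) (player2 : List Int) (board : List Int) (out : Bool) : Decidable (Spec_check_board_fullhouse player1 player2 board out) := by unfold Spec_check_board_fullhouse; infer_instance

-- ===== CLAIM (what is proved, stated in full; the proofs are below) =====
def Claim_equal_check_board_fullhouse : Prop := ∀ (player1 : List Int) (player2 : List Int) (board : List Int), Dom_check_board_fullhouse player1 player2 board → Pre_check_board_fullhouse player1 player2 board → Spec_check_board_fullhouse player1 player2 board (check_board_fullhouse player1 player2 board)

-- ===== LEMMAS AND PROOFS =====

theorem pvDwGt (v : Int) (rest : List Int) (hs : (v :: rest).Pairwise (· ≤ ·)) :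
    ∀ x ∈ rest.dropWhile (fun x => x == v), v < x := by
  cases hdw : rest.dropWhile (fun x => x == v) with
  | nil => intro x hx; simp at hx
  | cons h t =>
    have hsub : (rest.dropWhile (fun x => x == v)).Sublist rest := List.dropWhile_sublist _
    rw [hdw] at hsub
    have hrest : ∀ x ∈ rest, v ≤ x := by
      intro x hx; exact (List.pairwise_cons.mp hs).1 x hx
    have hvh : v < h := by
      have hmem : h ∈ rest := hsub.mem (by simp)
      have hle := hrest h hmem
      have hne : ¬ (h == v) = true := by
        have := List.head_dropWhile_not (fun x => x == v) (l := rest) (by simp [hdw])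
        simpa [hdw] using this
      have : h ≠ v := by simpa using hne
      omega
    intro x hx
    rcases List.mem_cons.mp hx with rfl | hx'
    · exact hvh
    · have hp : (h :: t).Pairwise (· ≤ ·) := ((List.pairwise_cons.mp hs).2).sublist hsub
      have := (List.pairwise_cons.mp hp).1 x hx'
      omega

theorem pvTwEq (v : Int) (rest : List Int) :
    ∀ x ∈ rest.takeWhile (fun x => x == v), x = v := by
  intro x hx
  have h := List.mem_takeWhile_imp hx
  simpa using h

theorem pvCountHead (v : Int) (rest : List Int) (hs : (v :: rest).Pairwise (· ≤ ·)) :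
    (v :: rest).count v = (rest.takeWhile (fun x => x == v)).length + 1 := by
  have hsplit : rest = rest.takeWhile (fun x => x == v) ++ rest.dropWhile (fun x => x == v) :=
    (List.takeWhile_append_dropWhile).symm
  rw [List.count_cons_self]
  conv_lhs => rw [hsplit]
  rw [List.count_append]
  have h1 : (rest.takeWhile (fun x => x == v)).count v = (rest.takeWhile (fun x => x == v)).length := by
    rw [List.count_eq_length]
    intro b hb; exact (pvTwEq v rest b hb).symm
  have h2 : (rest.dropWhile (fun x => x == v)).count v = 0 := by
    rw [List.count_eq_zero]
    intro hmem
    exact absurd (pvDwGt v rest hs v hmem) (by omega)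
  omega

theorem pvCountTail (v w : Int) (rest : List Int) (hvw : v < w) :
    (v :: rest).count w = (rest.dropWhile (fun x => x == v)).count w := by
  have hsplit : rest = rest.takeWhile (fun x => x == v) ++ rest.dropWhile (fun x => x == v) :=
    (List.takeWhile_append_dropWhile).symm
  conv_lhs => rw [hsplit]
  rw [List.count_cons, List.count_append]
  have h1 : (rest.takeWhile (fun x => x == v)).count w = 0 := by
    rw [List.count_eq_zero]
    intro hmem
    have := pvTwEq v rest w hmem
    omega
  have h2 : (v == w) = false := by simp; omega
  simp [h1, h2]

theorem pvRunsMem (s : List Int) (hs : s.Pairwise (· ≤ ·)) (v : Int) (n : Int) :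
    (v, n) ∈ pvRuns s ↔ (v ∈ s ∧ n = (s.count v : Int)) := by
  induction s using pvRuns.induct with
  | case1 => simp [pvRuns]
  | case2 w rest ih =>
    have hrest : rest.Pairwise (· ≤ ·) := (List.pairwise_cons.mp hs).2
    have hdws : (rest.dropWhile (fun x => x == w)).Pairwise (· ≤ ·) :=
      hrest.sublist (List.dropWhile_sublist _)
    have ih' := ih hdws
    rw [pvRuns]
    simp only [List.mem_cons, Prod.mk.injEq]
    constructor
    · rintro (⟨rfl, rfl⟩ | hmem)
      · refine ⟨by simp, ?_⟩
        rw [pvCountHead v rest hs]; push_cast; ring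
      · obtain ⟨hvin, hn⟩ := (ih').mp hmem
        have hgt : w < v := pvDwGt w rest hs v hvin
        have hsub : (rest.dropWhile (fun x => x == w)).Sublist rest := List.dropWhile_sublist _
        refine ⟨Or.inr (hsub.mem hvin), ?_⟩
        rw [pvCountTail w v rest hgt]; exact hn
    · rintro ⟨hvin, hn⟩
      by_cases hvw : v = w
      · subst hvw
        left
        refine ⟨rfl, ?_⟩
        rw [pvCountHead v rest hs] at hn; push_cast at hn ⊢; omega
      · right
        have hvrest : v ∈ rest := by
          rcases hvin with h | h
          · exact absurd h hvw
          · exact h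
        have hvdw : v ∈ rest.dropWhile (fun x => x == w) := by
          have hsplit : rest = rest.takeWhile (fun x => x == w) ++ rest.dropWhile (fun x => x == w) :=
            (List.takeWhile_append_dropWhile).symm
          rw [hsplit] at hvrest
          rcases List.mem_append.mp hvrest with h | h
          · exact absurd (pvTwEq w rest v h) hvw
          · exact h
        have hgt : w < v := pvDwGt w rest hs v hvdw
        rw [ih']
        refine ⟨hvdw, ?_⟩
        rw [pvCountTail w v rest hgt] at hn; exact hn

theorem pvRunsKeysLt (s : List Int) (hs : s.Pairwise (· ≤ ·)) :
    ((pvRuns s).map Prod.fst).Pairwise (· < ·) := by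
  induction s using pvRuns.induct with
  | case1 => simp [pvRuns]
  | case2 w rest ih =>
    have hrest : rest.Pairwise (· ≤ ·) := (List.pairwise_cons.mp hs).2
    have hdws : (rest.dropWhile (fun x => x == w)).Pairwise (· ≤ ·) :=
      hrest.sublist (List.dropWhile_sublist _)
    rw [pvRuns]
    simp only [List.map_cons, List.pairwise_cons]
    refine ⟨?_, ih hdws⟩
    intro k hk
    rcases List.mem_map.mp hk with ⟨⟨v, n⟩, hmem, rfl⟩
    have := (pvRunsMem _ hdws v n).mp hmem
    exact pvDwGt w rest hs v this.1

theorem pvRangeMem (x : Int) : x ∈ PySem.List.pyRange 0 14 1 ↔ (0 ≤ x ∧ x ≤ 13) := by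
  have h : PySem.List.pyRange 0 14 1 = [0,1,2,3,4,5,6,7,8,9,10,11,12,13] := by decide
  rw [h]; simp; omega

theorem pvFilterEq (board : List Int) (m : Nat) (hm : 0 < m) :
    ((pvRuns (PySem.List.sorted board (fun x => x) false)).filter
        (fun vn => vn.2 == (m : Int) && decide (0 ≤ vn.1) && decide (vn.1 ≤ 13))).map Prod.fst
      = (PySem.List.pyRange 0 14 1).filter (fun r => board.count r == m) := by
  set s := PySem.List.sorted board (fun x => x) false with hsdef
  have hs : s.Pairwise (· ≤ ·) := by
    have := PySem.List.sorted_pairwise (xs := board) (key := fun x => x)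
    simpa [hsdef] using this
  have hperm : s.Perm board := PySem.List.sorted_perm board (fun x => x) false
  set L := ((pvRuns s).filter
      (fun vn => vn.2 == (m : Int) && decide (0 ≤ vn.1) && decide (vn.1 ≤ 13))).map Prod.fst with hL
  set R := (PySem.List.pyRange 0 14 1).filter (fun r => board.count r == m) with hR
  have hLlt : L.Pairwise (· < ·) := by
    have hkeys := pvRunsKeysLt s hs
    have hsub : L.Sublist ((pvRuns s).map Prod.fst) := (List.filter_sublist).map _
    exact hkeys.sublist hsub
  have hRlt : R.Pairwise (· < ·) := by
    have hrange : (PySem.List.pyRange 0 14 1).Pairwise (· < ·) := by decide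
    exact hrange.sublist List.filter_sublist
  have hLmem : ∀ x, x ∈ L ↔ (0 ≤ x ∧ x ≤ 13 ∧ board.count x = m) := by
    intro x
    constructor
    · intro hx
      rcases List.mem_map.mp hx with ⟨⟨v, n⟩, hmem, rfl⟩
      rcases List.mem_filter.mp hmem with ⟨hruns, hq⟩
      simp only [Bool.and_eq_true, beq_iff_eq, decide_eq_true_eq] at hq
      obtain ⟨⟨hn, h0⟩, h13⟩ := hq
      have := (pvRunsMem s hs v n).mp hruns
      refine ⟨h0, h13, ?_⟩
      have : (s.count v : Int) = (m : Int) := by omega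
      have hc : s.count v = m := by exact_mod_cast this
      rw [← hperm.count_eq]; exact hc
    · rintro ⟨h0, h13, hc⟩
      have hcs : s.count x = m := by rw [hperm.count_eq]; exact hc
      have hxin : x ∈ s := by
        rw [← List.count_pos_iff]; omega
      refine List.mem_map.mpr ⟨(x, (s.count x : Int)), ?_, rfl⟩
      refine List.mem_filter.mpr ⟨(pvRunsMem s hs x _).mpr ⟨hxin, rfl⟩, ?_⟩
      simp only [Bool.and_eq_true, beq_iff_eq, decide_eq_true_eq]
      exact ⟨⟨by exact_mod_cast hcs, h0⟩, h13⟩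
  have hRmem : ∀ x, x ∈ R ↔ (0 ≤ x ∧ x ≤ 13 ∧ board.count x = m) := by
    intro x
    rw [hR, List.mem_filter, pvRangeMem]
    simp only [beq_iff_eq]
    tauto
  have hmemiff : ∀ x, x ∈ L ↔ x ∈ R := by intro x; rw [hLmem, hRmem]
  have hLnd : L.Nodup := hLlt.imp (fun h => ne_of_lt h)
  have hRnd : R.Nodup := hRlt.imp (fun h => ne_of_lt h)
  have hperm2 : L.Perm R := (List.perm_ext_iff_of_nodup hLnd hRnd).mpr hmemiff
  have h1 : PySem.List.sorted R (fun x => x) false = L :=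
    PySem.List.sorted_eq_of_perm_of_pairwise_lt R L (fun x => x) hperm2 (by simpa using hLlt)
  have h2 : PySem.List.sorted R (fun x => x) false = R :=
    PySem.List.sorted_eq_of_perm_of_pairwise_lt R R (fun x => x) (List.Perm.refl R) (by simpa using hRlt)
  rw [← h1, h2]

theorem pvBeqComm (a b : Int) : (a == b) = (b == a) := by
  by_cases h : a = b
  · simp [h]
  · simp [h, Ne.symm h]

theorem pvPairHelp (x p t : Int) : (x == p && decide (x > t)) = (p == x && decide (p > t)) := by
  by_cases h : x = p
  · subst h; rfl
  · have hx : (x == p) = false := by simp [h]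
    have hp : (p == x) = false := by simp [Ne.symm h]
    rw [hx, hp]
    simp

theorem pvHolesEq (p1 p2 : List Int) (t : Int) :
    ([pvGetA p1 0, pvGetA p1 1, pvGetA p2 0, pvGetA p2 1].contains t) =
      (pvGetA p1 0 == t || pvGetA p1 1 == t || pvGetA p2 0 == t || pvGetA p2 1 == t) := by
  simp only [List.contains_eq_any_beq, List.any_cons, List.any_nil, Bool.or_false]
  rw [pvBeqComm t (pvGetA p1 0), pvBeqComm t (pvGetA p1 1), pvBeqComm t (pvGetA p2 0), pvBeqComm t (pvGetA p2 1)]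
  simp only [Bool.or_assoc]

theorem pvOkEq (p1 p2 : List Int) (t p : Int) :
    ([pvGetA p1 0, pvGetA p1 1, pvGetA p2 0, pvGetA p2 1].contains p && decide (p > t)) =
      ((pvGetA p1 0 == p && decide (pvGetA p1 0 > t)) || (pvGetA p1 1 == p && decide (pvGetA p1 1 > t)) ||
       (pvGetA p2 0 == p && decide (pvGetA p2 0 > t)) || (pvGetA p2 1 == p && decide (pvGetA p2 1 > t))) := by
  rw [pvPairHelp (pvGetA p1 0) p t, pvPairHelp (pvGetA p1 1) p t, pvPairHelp (pvGetA p2 0) p t, pvPairHelp (pvGetA p2 1) p t]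
  cases hd : decide (p > t) <;>
    simp [List.contains_eq_any_beq, Bool.or_assoc, beq_eq_decide]

theorem pvAinnerChar (p1 p2 board : List Int) (c3 : Int) (ranks : List Int) :
    pvAinner p1 p2 board c3 ranks false =
      (!(pvGetA p1 0 == c3 || pvGetA p1 1 == c3 || pvGetA p2 0 == c3 || pvGetA p2 1 == c3) &&
        ranks.any (fun p => board.count p == 2 &&
          !((pvGetA p1 0 == p && decide (pvGetA p1 0 > c3)) || (pvGetA p1 1 == p && decide (pvGetA p1 1 > c3)) ||
            (pvGetA p2 0 == p && decide (pvGetA p2 0 > c3)) || (pvGetA p2 1 == p && decide (pvGetA p2 1 > c3))))) := by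
  induction ranks with
  | nil => simp [pvAinner]
  | cons p rest ih =>
    simp only [pvAinner, List.any_cons]
    by_cases hc : (board.count p == 2) = true
    · by_cases hg : (pvGetA p1 0 == c3 || pvGetA p1 1 == c3 || pvGetA p2 0 == c3 || pvGetA p2 1 == c3) = true
      · simp [hc, hg, ih]
      · simp only [Bool.not_eq_true] at hg
        by_cases hk : ((pvGetA p1 0 == p && decide (pvGetA p1 0 > c3)) || (pvGetA p1 1 == p && decide (pvGetA p1 1 > c3)) ||
            (pvGetA p2 0 == p && decide (pvGetA p2 0 > c3)) || (pvGetA p2 1 == p && decide (pvGetA p2 1 > c3))) = true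
        · simp [hc, hg, hk, ih]
        · simp only [Bool.not_eq_true] at hk
          simp [hc, hg, hk]
    · simp only [Bool.not_eq_true] at hc
      simp [hc, ih]

-- A's outer loop returns the inner loop at the head of the filtered trip-rank list

theorem pvAouterChar (p1 p2 board : List Int) (ranks : List Int) :
    pvAouter p1 p2 board ranks =
      (match (ranks.filter (fun i => board.count i == 3)).head? with
       | none => false
       | some t => pvAinner p1 p2 board t (PySem.List.pyRange 0 14 1) false) := by
  induction ranks with
  | nil => simp [pvAouter]
  | cons i rest ih =>
    simp only [pvAouter, List.filter_cons]
    by_cases h3 : (board.count i == 3) = true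
    · simp [h3]
    · simp only [Bool.not_eq_true] at h3
      simp [h3, ih]

theorem pvNotK (p1 p2 : List Int) (t p : Int) :
    (!([pvGetA p1 0, pvGetA p1 1, pvGetA p2 0, pvGetA p2 1].contains p) || decide (p ≤ t)) =
      !((pvGetA p1 0 == p && decide (pvGetA p1 0 > t)) || (pvGetA p1 1 == p && decide (pvGetA p1 1 > t)) ||
        (pvGetA p2 0 == p && decide (pvGetA p2 0 > t)) || (pvGetA p2 1 == p && decide (pvGetA p2 1 > t))) := by
  rw [← pvOkEq]
  by_cases h : p ≤ t
  · have : decide (p > t) = false := by simp; omega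
    simp [h, this]
  · have h1 : decide (p ≤ t) = false := by simp; omega
    have h2 : decide (p > t) = true := by simp; omega
    simp [h1, h2]

theorem pvMain (p1 p2 board : List Int) :
    pvAouter p1 p2 board (PySem.List.pyRange 0 14 1) = check_board_fullhouse_alt p1 p2 board := by
  rw [pvAouterChar]
  show _ = check_board_fullhouse_alt p1 p2 board
  unfold check_board_fullhouse_alt
  simp only []
  rw [show ((pvRuns (PySem.List.sorted board (fun x => x) false)).filter
        (fun vn => vn.2 == 3 && decide (0 ≤ vn.1) && decide (vn.1 ≤ 13))).map Prod.fst
      = (PySem.List.pyRange 0 14 1).filter (fun r => board.count r == 3) from by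
        simpa using pvFilterEq board 3 (by omega)]
  rw [show ((pvRuns (PySem.List.sorted board (fun x => x) false)).filter
        (fun vn => vn.2 == 2 && decide (0 ≤ vn.1) && decide (vn.1 ≤ 13))).map Prod.fst
      = (PySem.List.pyRange 0 14 1).filter (fun r => board.count r == 2) from by
        simpa using pvFilterEq board 2 (by omega)]
  cases hT : (PySem.List.pyRange 0 14 1).filter (fun r => board.count r == 3) with
  | nil => rfl
  | cons t Ttail =>
    simp only [List.head?]
    rw [pvAinnerChar]
    cases hP : (PySem.List.pyRange 0 14 1).filter (fun r => board.count r == 2) with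
    | nil =>
      have hany : (PySem.List.pyRange 0 14 1).any (fun p => board.count p == 2 &&
          !((pvGetA p1 0 == p && decide (pvGetA p1 0 > t)) || (pvGetA p1 1 == p && decide (pvGetA p1 1 > t)) ||
            (pvGetA p2 0 == p && decide (pvGetA p2 0 > t)) || (pvGetA p2 1 == p && decide (pvGetA p2 1 > t)))) = false := by
        rw [← List.any_filter, hP, List.any_nil]
      rw [hany, Bool.and_false]
    | cons p Ptail =>
      rw [← List.any_filter, hP]
      show _ = (!([pvGetA p1 0, pvGetA p1 1, pvGetA p2 0, pvGetA p2 1].contains t) &&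
        (p :: Ptail).any (fun q => !([pvGetA p1 0, pvGetA p1 1, pvGetA p2 0, pvGetA p2 1].contains q) || decide (q ≤ t)))
      rw [pvHolesEq]
      simp only [← pvNotK]

-- ===== VERDICT (by name: the statement is the Claim_ definition above) =====
theorem check_board_fullhouse_spec : Claim_equal_check_board_fullhouse := by
  intro p1 p2 board _ _
  unfold Spec_check_board_fullhouse check_board_fullhouse
  exact pvMain p1 p2 board
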